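-- pv_equiv track=rewrite | github.com/sb-ncbr/overprot | OverProt/overprot/libs/lib.py | invert_offsets
-- ===== SOURCE A (Python) =====
-- def invert_offsets(offsets):  # Produces inverse mapping for offsets, e.g. [0, 3, 5, 10] => [0, 0, 0, 1, 1, 2, 2, 2, 2, 2]
--     n = len(offsets)-1
--     result = []
--     for i in range(n):
--         fro = offsets[i]
--         to = offsets[i+1]
--         for j in range(fro, to):
--             result.append(i)
--     return result
-- ===== SOURCE B (Python) =====
-- def invert_offsets(offsets):
--     # Two-stage output-position scan: first normalize offsets into nondecreasing
--     # cumulative boundaries (clipping negative gaps), then walk the output line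
--     # k = 0..total-1 once, advancing a group pointer past exhausted boundaries.
--     if len(offsets) < 2:
--         return []
--     bounds = [0]
--     for fro, to in zip(offsets, offsets[1:]):
--         bounds.append(bounds[-1] + max(to - fro, 0))
--     result = []
--     g = 0
--     for k in range(bounds[-1]):
--         while k >= bounds[g + 1]:
--             g += 1
--         result.append(g)
--     return result
-- ===== Notes on version B (the rewrite author's own statement) =====
-- stated objective: alternative
-- what changed: Replaces A's nested loops (per group, append the group index once per covered element) by a two-stage output-position scan: build the nondecreasing cumulative boundary list once (clipping negative gaps), then walk output positions k = 0..total-1 in a single pass, advancing a group pointer with a while loop past exhausted boundaries.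
import Mathlib
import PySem

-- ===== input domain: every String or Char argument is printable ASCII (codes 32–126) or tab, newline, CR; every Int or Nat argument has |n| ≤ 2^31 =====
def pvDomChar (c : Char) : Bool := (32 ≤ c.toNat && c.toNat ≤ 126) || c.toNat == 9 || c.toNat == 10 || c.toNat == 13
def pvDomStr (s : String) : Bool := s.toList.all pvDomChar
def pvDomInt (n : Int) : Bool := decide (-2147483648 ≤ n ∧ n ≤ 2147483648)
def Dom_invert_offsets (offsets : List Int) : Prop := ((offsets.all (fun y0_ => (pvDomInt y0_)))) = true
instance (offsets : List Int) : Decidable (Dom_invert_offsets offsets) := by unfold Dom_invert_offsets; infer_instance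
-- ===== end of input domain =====

-- B replaces A's nested group/element loops by a two-stage output-position scan:
-- it first builds nondecreasing cumulative boundaries (clipping negative gaps),
-- then walks the output positions once, advancing a group pointer; objective: alternative (same cost).

-- ===== PORT A =====
def invert_offsets (offsets : List Int) : List Int :=
  let n : Int := PySem.List.len offsets - 1
  (PySem.List.pyRange 0 n 1).foldl (fun result i =>
    let fro := PySem.List.pyGetD offsets i 0
    let to_ := PySem.List.pyGetD offsets (i + 1) 0  -- 'to' is a Lean keyword
    (PySem.List.pyRange fro to_ 1).foldl (fun result _ => result ++ [i]) result) []

-- ===== PORT B =====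
-- the `while k >= bounds[g+1]: g += 1` loop, with fuel; fuel bounds.length always
-- suffices (the while stops at the first boundary exceeding k, and k < bounds[-1])
def pvAdvance (bounds : List Int) (k : Int) (g : Int) : Nat → Int
  | 0 => g
  | fuel+1 =>
      if PySem.List.pyGetD bounds (g + 1) 0 ≤ k then pvAdvance bounds k (g + 1) fuel else g

def invert_offsets_alt (offsets : List Int) : List Int :=
  if PySem.List.len offsets < 2 then [] else
    let bounds := (offsets.zip (PySem.List.slice offsets (some 1) none)).foldl
      (fun b p => b ++ [PySem.List.pyGetD b (-1) 0 + max (p.2 - p.1) 0]) [(0 : Int)]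
    ((PySem.List.pyRange 0 (PySem.List.pyGetD bounds (-1) 0) 1).foldl
      (fun st k =>
        let g := pvAdvance bounds k st.2 bounds.length
        (st.1 ++ [g], g))
      (([] : List Int), (0 : Int))).1

-- ===== PRECONDITION & SPEC =====
def Spec_invert_offsets (offsets : List Int) (out : List Int) : Prop := out = invert_offsets_alt offsets
instance (offsets : List Int) (out : List Int) : Decidable (Spec_invert_offsets offsets out) := by unfold Spec_invert_offsets; infer_instance

-- ===== CLAIM (what is proved, stated in full; the proofs are below) =====
def Claim_equal_invert_offsets : Prop := ∀ (offsets : List Int), Dom_invert_offsets offsets → Spec_invert_offsets offsets (invert_offsets offsets)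

-- ===== LEMMAS AND PROOFS =====

-- proof-side abbreviations: the clipped gap, cumulative boundaries, total output
-- length, and the canonical result (index i repeated by its gap)
def pvGap (p : Int × Int) : Int := max (p.2 - p.1) 0

def pvBounds (s : Int) : List (Int × Int) → List Int
  | [] => [s]
  | p :: ps => s :: pvBounds (s + pvGap p) ps

def pvTotal : List (Int × Int) → Int
  | [] => 0
  | p :: ps => pvGap p + pvTotal ps

def pvCanon (g : Int) : List (Int × Int) → List Int
  | [] => []
  | p :: ps => List.replicate (p.2 - p.1).toNat g ++ pvCanon (g + 1) ps

theorem pv_flatMap_congr {α β : Type} (l : List α) (f g : α → List β)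
    (h : ∀ x ∈ l, f x = g x) : l.flatMap f = l.flatMap g := by
  simp only [List.flatMap_def]
  exact congrArg List.flatten (List.map_congr_left h)

-- ---------- A-side: A equals the canonical result ----------

theorem pv_A_flatMap (offsets : List Int) :
    invert_offsets offsets =
      (PySem.List.pyRange 0 ((offsets.length : Int) - 1) 1).flatMap
        (fun i => List.replicate
          ((PySem.List.pyGetD offsets (i + 1) 0 - PySem.List.pyGetD offsets i 0)).toNat i) := by
  unfold invert_offsets
  simp only [PySem.List.len_eq]
  have hbody : ∀ (acc : List Int) (i : Int),
      (PySem.List.pyRange (PySem.List.pyGetD offsets i 0) (PySem.List.pyGetD offsets (i+1) 0) 1).foldl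
        (fun result _ => result ++ [i]) acc
      = acc ++ List.replicate
          ((PySem.List.pyGetD offsets (i + 1) 0 - PySem.List.pyGetD offsets i 0)).toNat i := by
    intro acc i
    rw [PySem.List.foldl_append_singleton_eq_map (fun _ => i)]
    rw [List.map_const', PySem.List.length_pyRange_one]
  calc (PySem.List.pyRange 0 ((offsets.length : Int) - 1) 1).foldl
        (fun result i =>
          (PySem.List.pyRange (PySem.List.pyGetD offsets i 0) (PySem.List.pyGetD offsets (i+1) 0) 1).foldl
            (fun result _ => result ++ [i]) result) []
      = (PySem.List.pyRange 0 ((offsets.length : Int) - 1) 1).foldl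
        (fun result i => result ++ List.replicate
          ((PySem.List.pyGetD offsets (i + 1) 0 - PySem.List.pyGetD offsets i 0)).toNat i) [] := by
        apply PySem.List.foldl_congr_mem
        intro acc i _
        exact hbody acc i
    _ = _ := by
        rw [PySem.List.foldl_append_eq_flatMap]
        simp

theorem pv_enum_canon : ∀ (l : List (Int × Int)) (s : Int),
    (PySem.List.enumerate l s).flatMap
      (fun p => List.replicate (p.2.2 - p.2.1).toNat p.1) = pvCanon s l := by
  intro l
  induction l with
  | nil => intro s; simp [PySem.List.enumerate_nil, pvCanon]
  | cons p ps ih =>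
      intro s
      rw [PySem.List.enumerate_cons]
      simp only [List.flatMap_cons, pvCanon, ih (s + 1)]

theorem pv_A_canon (offsets : List Int) :
    invert_offsets offsets = pvCanon 0 (offsets.zip offsets.tail) := by
  rw [pv_A_flatMap, ← pv_enum_canon (offsets.zip offsets.tail) 0,
    PySem.List.enumerate_eq_map_pyRange (offsets.zip offsets.tail) ((0 : Int), (0 : Int))]
  rw [List.flatMap_map]
  rcases offsets with _ | ⟨a, rest⟩
  · simp [PySem.List.pyRange]
  · have hlen : ((a :: rest).zip (a :: rest).tail).length = rest.length := by
      simp [List.length_zip]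
    rw [PySem.List.len_eq, hlen]
    have hn : ((a :: rest).length : Int) - 1 = (rest.length : Int) := by
      push_cast [List.length_cons]; ring
    rw [hn]
    apply pv_flatMap_congr
    intro j hj
    rw [PySem.List.mem_pyRange_one] at hj
    obtain ⟨h0, h1⟩ := hj
    rw [PySem.List.pyGetD_eq_getElem ((a :: rest).zip (a :: rest).tail) ((0 : Int), (0 : Int)) h0 (by rw [hlen]; exact_mod_cast h1),
      PySem.List.pyGetD_eq_getElem (a :: rest) (0 : Int) h0 (by simp; omega),
      PySem.List.pyGetD_eq_getElem (a :: rest) (0 : Int) (by omega) (by simp; omega)]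
    have ht : (j + 1).toNat = j.toNat + 1 := by omega
    simp [List.getElem_zip, ht]

-- ---------- boundary-list facts ----------

theorem pv_total_nonneg : ∀ (ps : List (Int × Int)), 0 ≤ pvTotal ps := by
  intro ps
  induction ps with
  | nil => simp [pvTotal]
  | cons p ps ih => 
      have : 0 ≤ pvGap p := le_max_right _ _
      simp only [pvTotal]; omega

theorem pv_bounds_ne_nil (s : Int) (ps : List (Int × Int)) : pvBounds s ps ≠ [] := by
  cases ps <;> simp [pvBounds]

theorem pv_bounds_lastD : ∀ (ps : List (Int × Int)) (s d : Int),
    (pvBounds s ps).getLastD d = s + pvTotal ps := by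
  intro ps
  induction ps with
  | nil => intro s d; simp [pvBounds, pvTotal]
  | cons p ps ih => intro s d; simp only [pvBounds, pvTotal, List.getLastD_cons, ih]; ring

theorem pv_bounds_length : ∀ (ps : List (Int × Int)) (s : Int),
    (pvBounds s ps).length = ps.length + 1 := by
  intro ps
  induction ps with
  | nil => intro s; simp [pvBounds]
  | cons p ps ih => intro s; simp [pvBounds, ih]

theorem pv_canon_total_zero : ∀ (ps : List (Int × Int)) (g : Int),
    pvTotal ps = 0 → pvCanon g ps = [] := by
  intro ps
  induction ps with
  | nil => intro g _; rfl
  | cons p ps ih =>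
      intro g h
      have h1 : 0 ≤ pvGap p := le_max_right _ _
      have h2 : 0 ≤ pvTotal ps := pv_total_nonneg ps
      simp only [pvTotal] at h
      have hg : pvGap p = 0 := by omega
      have hr : (p.2 - p.1).toNat = 0 := by
        simp only [pvGap] at hg; omega
      simp only [pvCanon, hr, List.replicate_zero, List.nil_append]
      exact ih (g + 1) (by omega)

-- pyGetD at -1 is the last element
theorem pv_getD_last (l : List Int) (h : l ≠ []) :
    PySem.List.pyGetD l (-1) 0 = l.getLastD 0 := by
  have h1 : (0 : Nat) < 1 := by omega
  have h2 : (1 : Nat) ≤ l.length := by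
    cases l with
    | nil => exact absurd rfl h
    | cons a t => simp
  have := PySem.List.pyGetD_neg_natCast (xs := l) (d := (0 : Int)) (k := 1) h1 h2
  simp only [Nat.cast_one] at this
  have hl : l.length - 1 < l.length := by
    cases l with
    | nil => exact absurd rfl h
    | cons a t => simp
  rw [this, List.getLastD_eq_getLast?, List.getLast?_eq_getElem?, List.getElem?_eq_getElem hl]
  rfl

theorem pv_bounds_cons (s : Int) (ps : List (Int × Int)) :
    pvBounds s ps = s :: (pvBounds s ps).tail := by
  cases ps <;> rfl

-- the bounds-building fold produces pvBounds
theorem pv_build : ∀ (ps : List (Int × Int)) (pre : List Int) (s : Int),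
    pre ≠ [] → pre.getLastD 0 = s →
    ps.foldl (fun b p => b ++ [PySem.List.pyGetD b (-1) 0 + max (p.2 - p.1) 0]) pre
      = pre ++ (pvBounds s ps).tail := by
  intro ps
  induction ps with
  | nil =>
      intro pre s _ _
      simp only [List.foldl_nil, pvBounds, List.tail_cons, List.append_nil]
  | cons p ps ih =>
      intro pre s hne hlast
      simp only [List.foldl_cons]
      rw [pv_getD_last pre hne, hlast]
      rw [ih (pre ++ [s + max (p.2 - p.1) 0]) (s + max (p.2 - p.1) 0) (by simp) (by simp)]
      rw [List.append_assoc]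
      congr 1
      show [s + pvGap p] ++ (pvBounds (s + pvGap p) ps).tail = pvBounds (s + pvGap p) ps
      conv_rhs => rw [pv_bounds_cons (s + pvGap p) ps]
      rfl

-- ---------- advance (the while loop) ----------

theorem pv_adv_stop (bounds : List Int) (k g : Int) (f : Nat)
    (h : k < PySem.List.pyGetD bounds (g + 1) 0) : pvAdvance bounds k g f = g := by
  cases f with
  | zero => rfl
  | succ f => simp [pvAdvance, not_le.mpr h]

theorem pv_adv_skip (bounds : List Int) (k g : Int) (f : Nat)
    (h : PySem.List.pyGetD bounds (g + 1) 0 ≤ k) :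
    pvAdvance bounds k g (f + 1) = pvAdvance bounds k (g + 1) f := by
  simp [pvAdvance, h]

theorem pv_adv_fuel (bounds : List Int) (k : Int) :
    ∀ (j f1 f2 : Nat) (g : Int), j ≤ f1 → j ≤ f2 →
      k < PySem.List.pyGetD bounds (g + 1 + j) 0 →
      pvAdvance bounds k g f1 = pvAdvance bounds k g f2 := by
  intro j
  induction j with
  | zero =>
      intro f1 f2 g _ _ h
      simp only [Nat.cast_zero, add_zero] at h
      rw [pv_adv_stop bounds k g f1 h, pv_adv_stop bounds k g f2 h]
  | succ j ih =>
      intro f1 f2 g h1 h2 h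
      by_cases hc : PySem.List.pyGetD bounds (g + 1) 0 ≤ k
      · obtain ⟨f1p, rfl⟩ : ∃ f1p, f1 = f1p + 1 := ⟨f1 - 1, by omega⟩
        obtain ⟨f2p, rfl⟩ : ∃ f2p, f2 = f2p + 1 := ⟨f2 - 1, by omega⟩
        rw [pv_adv_skip bounds k g f1p hc, pv_adv_skip bounds k g f2p hc]
        apply ih f1p f2p (g + 1) (by omega) (by omega)
        have he : g + 1 + 1 + (j : Int) = g + 1 + ((j : Nat) + 1 : Nat) := by push_cast; ring
        rw [he]; exact h
      · push_neg at hc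
        rw [pv_adv_stop bounds k g f1 hc, pv_adv_stop bounds k g f2 hc]

-- pyGetD through a drop-characterisation of bounds
theorem pv_getD_drop (bounds : List Int) (gn m : Nat) (l : List Int)
    (h : bounds.drop gn = l) (hm : m < l.length) :
    PySem.List.pyGetD bounds ((gn : Int) + m) 0 = l[m] := by
  have hlen : gn + m < bounds.length := by
    have := congrArg List.length h
    simp only [List.length_drop] at this
    omega
  rw [PySem.List.pyGetD_eq_getElem bounds (0 : Int) (by positivity) (by omega)]
  have hn : ((gn : Int) + m).toNat = gn + m := by omega
  have he : bounds[((gn : Int) + m).toNat]'(by omega) = bounds[gn + m]'hlen := by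
    congr 1
  rw [he]
  subst h
  rw [List.getElem_drop]

-- bounds[gn+1] is the next boundary s + gap
theorem pv_getD_next (bounds : List Int) (gn : Nat) (s : Int) (p : Int × Int)
    (ps : List (Int × Int)) (hdrop : bounds.drop gn = pvBounds s (p :: ps)) :
    PySem.List.pyGetD bounds ((gn : Int) + 1) 0 = s + pvGap p := by
  have h := pv_getD_drop bounds gn 1 (pvBounds s (p :: ps)) hdrop
    (by simp [pv_bounds_length])
  simp only [Nat.cast_one] at h
  rw [h]
  have e1 : pvBounds s (p :: ps) = s :: (s + pvGap p) :: (pvBounds (s + pvGap p) ps).tail := by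
    cases ps <;> rfl
  simp only [e1, List.getElem_cons_succ, List.getElem_cons_zero]

theorem pv_drop_succ (bounds : List Int) (gn : Nat) (s : Int) (p : Int × Int)
    (ps : List (Int × Int)) (hdrop : bounds.drop gn = pvBounds s (p :: ps)) :
    bounds.drop (gn + 1) = pvBounds (s + pvGap p) ps := by
  rw [← List.tail_drop, hdrop]
  rfl

theorem pv_exists_big : ∀ (ps : List (Int × Int)) (s : Int) (gn : Nat) (bounds : List Int),
    bounds.drop gn = pvBounds s ps → 0 < pvTotal ps →
    ∃ j : Nat, j < ps.length ∧ s < PySem.List.pyGetD bounds ((gn : Int) + 1 + j) 0 := by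
  intro ps
  induction ps with
  | nil =>
      intro s gn bounds _ h
      have hz : pvTotal ([] : List (Int × Int)) = 0 := rfl
      omega
  | cons p ps ih =>
      intro s gn bounds hdrop htot
      by_cases hg : 0 < pvGap p
      · refine ⟨0, by simp, ?_⟩
        have h1 := pv_getD_next bounds gn s p ps hdrop
        have he : (gn : Int) + 1 + ((0 : Nat) : Int) = (gn : Int) + 1 := by push_cast; ring
        rw [he, h1]
        omega
      · have hgz : pvGap p = 0 := by
          have := le_max_right (p.2 - p.1) 0
          simp only [pvGap] at *
          omega
        have hdrop2 := pv_drop_succ bounds gn s p ps hdrop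
        have htot2 : 0 < pvTotal ps := by
          have hh : pvTotal (p :: ps) = pvGap p + pvTotal ps := rfl
          omega
        obtain ⟨j, hj1, hj2⟩ := ih (s + pvGap p) (gn + 1) bounds hdrop2 htot2
        refine ⟨j + 1, by simp only [List.length_cons]; omega, ?_⟩
        have he : (gn : Int) + 1 + ((j + 1 : Nat) : Int) = ((gn + 1 : Nat) : Int) + 1 + j := by
          push_cast; ring
        rw [he]
        rw [hgz, add_zero] at hj2
        exact hj2

-- a run of positions within the current group leaves the pointer unchanged
theorem pv_chunk (bounds : List Int) : ∀ (ks : List Int) (acc : List Int) (g : Int),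
    (∀ k ∈ ks, k < PySem.List.pyGetD bounds (g + 1) 0) →
    ks.foldl (fun st k =>
        let gp := pvAdvance bounds k st.2 bounds.length
        (st.1 ++ [gp], gp)) (acc, g)
      = (acc ++ ks.map (fun _ => g), g) := by
  intro ks
  induction ks with
  | nil => intro acc g _; simp
  | cons k ks ih =>
      intro acc g h
      simp only [List.foldl_cons]
      rw [pv_adv_stop bounds k g bounds.length (h k (by simp))]
      rw [ih (acc ++ [g]) g (fun kp hkp => h kp (by simp [hkp]))]
      simp

-- main scan lemma: the pointer walk over the output line produces pvCanon
theorem pv_scan : ∀ (ps : List (Int × Int)) (gn : Nat) (s : Int) (acc : List Int)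
    (bounds : List Int), bounds.drop gn = pvBounds s ps →
    ((PySem.List.pyRange s (s + pvTotal ps) 1).foldl
      (fun st k =>
        let gp := pvAdvance bounds k st.2 bounds.length
        (st.1 ++ [gp], gp)) (acc, (gn : Int))).1
      = acc ++ pvCanon gn ps := by
  intro ps
  induction ps with
  | nil =>
      intro gn s acc bounds _
      rw [show s + pvTotal [] = s from by rw [show pvTotal [] = 0 from rfl]; ring]
      rw [PySem.List.pyRange_one_eq_nil (le_refl s)]
      simp [pvCanon]
  | cons p ps ih =>
      intro gn s acc bounds hdrop
      have hgap0 : 0 ≤ pvGap p := le_max_right _ _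
      have htot0 : 0 ≤ pvTotal ps := pv_total_nonneg ps
      have htot : pvTotal (p :: ps) = pvGap p + pvTotal ps := rfl
      have hb1 := pv_getD_next bounds gn s p ps hdrop
      have hdrop2 := pv_drop_succ bounds gn s p ps hdrop
      have hE : s + pvTotal (p :: ps) = (s + pvGap p) + pvTotal ps := by rw [htot]; ring
      rw [hE]
      have hsplit : PySem.List.pyRange s ((s + pvGap p) + pvTotal ps) 1
          = PySem.List.pyRange s (s + pvGap p) 1
            ++ PySem.List.pyRange (s + pvGap p) ((s + pvGap p) + pvTotal ps) 1 := by
        apply PySem.List.pyRange_one_append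
        · omega
        · omega
      rw [hsplit, List.foldl_append]
      rw [pv_chunk bounds (PySem.List.pyRange s (s + pvGap p) 1) acc (gn : Int)
        (fun k hk => by
          rw [PySem.List.mem_pyRange_one] at hk
          omega)]
      have hrep : (PySem.List.pyRange s (s + pvGap p) 1).map (fun _ => (gn : Int))
          = List.replicate (p.2 - p.1).toNat (gn : Int) := by
        rw [List.map_const', PySem.List.length_pyRange_one]
        congr 1
        simp only [pvGap]; omega
      rw [hrep]
      have hcanon : pvCanon (gn : Int) (p :: ps)
          = List.replicate (p.2 - p.1).toNat (gn : Int) ++ pvCanon ((gn : Int) + 1) ps := rfl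
      by_cases hz : pvTotal ps = 0
      · rw [hz, add_zero]
        rw [PySem.List.pyRange_one_eq_nil (le_refl _)]
        simp only [List.foldl_nil]
        rw [hcanon, pv_canon_total_zero ps ((gn : Int) + 1) hz]
        simp
      · have htotpos : 0 < pvTotal ps := by omega
        have hlenb : bounds.length = gn + ps.length + 2 := by
          have h1 := congrArg List.length hdrop2
          simp only [List.length_drop, pv_bounds_length] at h1
          have hgn : gn + 1 ≤ bounds.length := by
            by_contra hcon
            push_neg at hcon
            rw [List.drop_eq_nil_of_le (by omega)] at hdrop2
            exact pv_bounds_ne_nil _ _ hdrop2.symm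
          omega
        have hcons : PySem.List.pyRange (s + pvGap p) ((s + pvGap p) + pvTotal ps) 1
            = (s + pvGap p) :: PySem.List.pyRange (s + pvGap p + 1) ((s + pvGap p) + pvTotal ps) 1 := by
          apply PySem.List.pyRange_one_cons
          omega
        obtain ⟨j, hj1, hj2⟩ := pv_exists_big ps (s + pvGap p) (gn + 1) bounds hdrop2 htotpos
        have hadv : pvAdvance bounds (s + pvGap p) (gn : Int) bounds.length
            = pvAdvance bounds (s + pvGap p) ((gn : Int) + 1) bounds.length := by
          obtain ⟨f, hf⟩ : ∃ f, bounds.length = f + 1 := ⟨bounds.length - 1, by omega⟩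
          conv_lhs => rw [hf]
          rw [pv_adv_skip bounds (s + pvGap p) (gn : Int) f (by rw [hb1])]
          apply pv_adv_fuel bounds (s + pvGap p) j f bounds.length ((gn : Int) + 1)
            (by omega) (by omega)
          have he : ((gn : Int) + 1) + 1 + (j : Int) = ((gn + 1 : Nat) : Int) + 1 + j := by
            push_cast; ring
          rw [he]
          exact hj2
        rw [hcons]
        simp only [List.foldl_cons]
        have hc : ((gn + 1 : Nat) : Int) = (gn : Int) + 1 := by push_cast; ring
        rw [hadv, ← hc]
        have := ih (gn + 1) (s + pvGap p)
          (acc ++ List.replicate (p.2 - p.1).toNat (gn : Int)) bounds hdrop2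
        rw [hcons] at this
        simp only [List.foldl_cons] at this
        rw [this, hcanon, hc, List.append_assoc]

theorem pv_B_canon (offsets : List Int) :
    invert_offsets_alt offsets = pvCanon 0 (offsets.zip offsets.tail) := by
  unfold invert_offsets_alt
  rw [PySem.List.slice_from_one]
  by_cases hlen : PySem.List.len offsets < 2
  · rw [if_pos hlen]
    have hz : offsets.zip offsets.tail = [] := by
      rcases offsets with _ | ⟨a, _ | ⟨b, t⟩⟩
      · rfl
      · rfl
      · exfalso; simp [PySem.List.len_eq] at hlen; omega
    rw [hz]
    rfl
  · rw [if_neg hlen]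
    have hbuild := pv_build (offsets.zip offsets.tail) [(0 : Int)] 0 (by simp) (by simp)
    rw [hbuild]
    show ((PySem.List.pyRange 0
        (PySem.List.pyGetD ([(0 : Int)] ++ (pvBounds 0 (offsets.zip offsets.tail)).tail) (-1) 0) 1).foldl
        (fun st k =>
          let g := pvAdvance ([(0 : Int)] ++ (pvBounds 0 (offsets.zip offsets.tail)).tail) k st.2
            ([(0 : Int)] ++ (pvBounds 0 (offsets.zip offsets.tail)).tail).length
          (st.1 ++ [g], g)) (([] : List Int), (0 : Int))).1 = pvCanon 0 (offsets.zip offsets.tail)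
    have hbl : [(0 : Int)] ++ (pvBounds 0 (offsets.zip offsets.tail)).tail
        = pvBounds 0 (offsets.zip offsets.tail) := by
      conv_rhs => rw [pv_bounds_cons 0 (offsets.zip offsets.tail)]
      rfl
    rw [hbl]
    rw [pv_getD_last _ (pv_bounds_ne_nil _ _), pv_bounds_lastD]
    have hscan := pv_scan (offsets.zip offsets.tail) 0 0 [] (pvBounds 0 (offsets.zip offsets.tail)) (by simp)
    rw [Nat.cast_zero] at hscan
    rw [hscan]
    rfl

theorem pv_main (offsets : List Int) :
    invert_offsets offsets = invert_offsets_alt offsets := by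
  rw [pv_A_canon, pv_B_canon]

-- ===== VERDICT (by name: the statement is the Claim_ definition above) =====
theorem invert_offsets_spec : Claim_equal_invert_offsets := by
  intro offsets _
  exact pv_main offsets
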